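-- pv_equiv track=rewrite | github.com/wmorrill24/UEIL-Data_Store | frontend/streamlit_app.py | _compute_subpath_options
-- ===== SOURCE A (Python) =====
-- def _compute_subpath_options(files):
--     """Return sorted unique directory prefixes ending with '/' derived from relative_path."""
--     prefixes = set()
--     for f in files:
--         rp = (f.get("relative_path") or "").lstrip("/")
--         if not rp or "/" not in rp:
--             continue
--         parts = rp.split("/")
--         # build all intermediate directory prefixes (exclude the file itself)
--         for i in range(1, len(parts)):  # up to parent
--             prefixes.add("/".join(parts[:i]) + "/")
--     return sorted(prefixes)
-- ===== SOURCE B (Python) =====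
-- def _compute_subpath_options(files):
--     """Return sorted unique directory prefixes ending with '/' derived from relative_path."""
--     prefixes = set()
--     for f in files:
--         rp = (f.get("relative_path") or "").lstrip("/")
--         prefix = ""
--         for ch in rp:
--             prefix += ch
--             if ch == "/":
--                 prefixes.add(prefix)
--     return sorted(prefixes)
-- ===== Notes on version B (the rewrite author's own statement) =====
-- stated objective: alternative
-- what changed: B replaces split('/') plus the indexed range loop that rebuilds each prefix with '/'.join(parts[:i]) by a single character scan per path that grows one running prefix and records it at every '/'; the emptiness/'/'-membership guard disappears because the scan adds nothing in those cases.
import Mathlib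
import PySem

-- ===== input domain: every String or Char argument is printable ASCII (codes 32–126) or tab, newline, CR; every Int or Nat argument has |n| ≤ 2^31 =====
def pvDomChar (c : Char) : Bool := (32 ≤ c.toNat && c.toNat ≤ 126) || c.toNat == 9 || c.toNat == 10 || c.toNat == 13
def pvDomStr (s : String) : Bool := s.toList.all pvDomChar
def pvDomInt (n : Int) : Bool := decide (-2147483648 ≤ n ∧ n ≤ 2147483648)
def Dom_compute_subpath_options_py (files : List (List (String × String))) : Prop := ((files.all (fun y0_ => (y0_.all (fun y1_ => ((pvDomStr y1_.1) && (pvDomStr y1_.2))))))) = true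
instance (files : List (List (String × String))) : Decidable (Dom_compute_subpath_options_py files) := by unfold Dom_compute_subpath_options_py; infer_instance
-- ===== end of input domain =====

-- B replaces the split + indexed-range prefix rebuilding by one running-prefix character scan; same sorted set of prefixes (return-value equivalence).

-- ===== PORT A =====
-- rp = (f.get("relative_path") or "").lstrip("/"); `x or ""` yields "" exactly when x is None or "", so it equals getD with default "";
-- .lstrip("/") is ported by hand as dropWhile (== '/'), exact (PySem has no lstrip-with-chars primitive).
def compute_subpath_options_py (files : List (List (String × String))) : List String :=
  let prefixes : PySem.Set String := files.foldl (fun prefixes f =>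
    let rp : List Char := ((PySem.Dict.getD (PySem.Dict.mk f) "relative_path" "").toList).dropWhile (fun c => c == '/')
    if rp.isEmpty || !(PySem.Chars.isIn ['/'] rp) then prefixes
    else
      let parts := PySem.Chars.splitOn rp ['/']
      (PySem.List.pyRange 1 (parts.length : Int) 1).foldl
        (fun pre i =>
          PySem.Set.add pre (String.ofList (PySem.Chars.join ['/'] (PySem.List.slice parts none (some i)) ++ ['/'])))
        prefixes) PySem.Set.empty
  PySem.List.sorted prefixes (fun x => x) false

-- ===== PORT B =====
def compute_subpath_options_py_alt (files : List (List (String × String))) : List String :=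
  let prefixes : PySem.Set String := files.foldl (fun prefixes f =>
    let rp : List Char := ((PySem.Dict.getD (PySem.Dict.mk f) "relative_path" "").toList).dropWhile (fun c => c == '/')
    (rp.foldl (fun (st : List Char × PySem.Set String) ch =>
        let acc := st.1 ++ [ch]
        (acc, if ch == '/' then PySem.Set.add st.2 (String.ofList acc) else st.2))
      (([] : List Char), prefixes)).2) PySem.Set.empty
  PySem.List.sorted prefixes (fun x => x) false

-- ===== PRECONDITION & SPEC =====
def Spec_compute_subpath_options_py (files : List (List (String × String))) (out : List String) : Prop := out = compute_subpath_options_py_alt files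
instance (files : List (List (String × String))) (out : List String) : Decidable (Spec_compute_subpath_options_py files out) := by unfold Spec_compute_subpath_options_py; infer_instance

-- ===== CLAIM (what is proved, stated in full; the proofs are below) =====
def Claim_equal_compute_subpath_options_py : Prop := ∀ (files : List (List (String × String))), Dom_compute_subpath_options_py files → Spec_compute_subpath_options_py files (compute_subpath_options_py files)

-- ===== LEMMAS AND PROOFS =====

-- the list of directory prefixes (each ending in '/') of a character list, in increasing length order
def padd : List Char → List (List Char)
  | [] => []
  | c :: cs => if c = '/' then ['/'] :: (padd cs).map (fun p => c :: p) else (padd cs).map (fun p => c :: p)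

-- the list  "/".join(parts[:i]) + "/"  for i = 1 .. len(parts)-1
def joins : List (List Char) → List (List Char)
  | [] => []
  | [_] => []
  | p :: q :: rest => (p ++ ['/']) :: (joins (q :: rest)).map (fun t => p ++ '/' :: t)

-- reference single-pass splitter on '/'
def splitRec (pre : List Char) : List Char → List (List Char)
  | [] => [pre]
  | c :: rest => if c = '/' then pre :: splitRec [] rest else splitRec (pre ++ [c]) rest

theorem splitRec_ne_nil (pre : List Char) (cs : List Char) : splitRec pre cs ≠ [] := by
  induction cs generalizing pre with
  | nil => simp [splitRec]
  | cons c rest ih =>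
    simp only [splitRec]
    split_ifs
    · simp
    · exact ih _

theorem go_eq_splitRec (cs : List Char) (fuel : Nat) (cur : List Char) (acc : List (List Char))
    (h : cs.length < fuel) :
    PySem.Chars.splitOn.go ['/'] fuel cs cur acc = acc.reverse ++ splitRec cur.reverse cs := by
  induction cs generalizing fuel cur acc with
  | nil =>
    cases fuel with
    | zero => omega
    | succ f => simp [PySem.Chars.splitOn.go, splitRec]
  | cons c rest ih =>
    cases fuel with
    | zero => omega
    | succ f =>
      by_cases hc : c = '/'
      · subst hc
        have hpre : List.isPrefixOf ['/'] ('/' :: rest) = true := by simp [List.isPrefixOf]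
        simp only [PySem.Chars.splitOn.go, hpre, if_pos]
        have hdrop : List.drop ['/'].length ('/' :: rest) = rest := rfl
        rw [hdrop, ih f [] (cur.reverse :: acc) (by simpa using Nat.lt_of_succ_lt_succ h)]
        simp [splitRec]
      · have hpre : List.isPrefixOf ['/'] (c :: rest) = false := by
          simp [List.isPrefixOf]; exact fun h' => (hc h'.symm).elim
        simp only [PySem.Chars.splitOn.go]
        rw [if_neg (by simp [hpre])]
        rw [ih f (c :: cur) acc (Nat.lt_of_succ_lt_succ h)]
        simp [splitRec, hc]

theorem splitOn_eq_splitRec (cs : List Char) :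
    PySem.Chars.splitOn cs ['/'] = splitRec [] cs := by
  unfold PySem.Chars.splitOn
  simpa using go_eq_splitRec cs (cs.length + 1) [] [] (by omega)

theorem joins_splitRec (cs : List Char) (pre : List Char) :
    joins (splitRec pre cs) = (padd cs).map (fun p => pre ++ p) := by
  induction cs generalizing pre with
  | nil => simp [splitRec, padd, joins]
  | cons c rest ih =>
    by_cases hc : c = '/'
    · subst hc
      obtain ⟨q, t, hqt⟩ : ∃ q t, splitRec [] rest = q :: t := by
        cases h : splitRec [] rest with
        | nil => exact absurd h (splitRec_ne_nil _ _)
        | cons q t => exact ⟨q, t, rfl⟩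
      have h1 : splitRec pre ('/' :: rest) = pre :: splitRec [] rest := by simp [splitRec]
      have h2 : padd ('/' :: rest) = ['/'] :: (padd rest).map (fun p => '/' :: p) := by
        simp [padd]
      rw [h1, h2, hqt]
      simp only [joins]
      rw [← hqt, ih]
      simp [List.map_map, Function.comp]
    · have h1 : splitRec pre (c :: rest) = splitRec (pre ++ [c]) rest := by simp [splitRec, hc]
      have h2 : padd (c :: rest) = (padd rest).map (fun p => c :: p) := by simp [padd, hc]
      rw [h1, h2, ih]
      simp [List.map_map, Function.comp, List.append_assoc]

theorem range_map_eq_joins (parts : List (List Char)) :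
    (List.range (parts.length - 1)).map
      (fun j => PySem.Chars.join ['/'] (parts.take (j + 1)) ++ ['/']) = joins parts := by
  induction parts with
  | nil => simp [joins]
  | cons p rest ih =>
    cases rest with
    | nil => simp [joins]
    | cons q t =>
      simp only [List.length_cons, Nat.add_sub_cancel]
      rw [List.range_succ_eq_map]
      simp only [List.map_cons, List.map_map, joins]
      congr 1
      · simp [PySem.Chars.join_singleton]
      · rw [← ih]
        simp only [List.length_cons, Nat.add_sub_cancel, List.map_map]
        apply List.map_congr_left
        intro j _
        simp [Function.comp, List.take, PySem.Chars.join_cons_cons, List.append_assoc]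

theorem padd_nil_of_not_mem {cs : List Char} (h : '/' ∉ cs) : padd cs = [] := by
  induction cs with
  | nil => rfl
  | cons c rest ih =>
    simp only [List.mem_cons, not_or] at h
    simp [padd, Ne.symm h.1, ih h.2]

theorem pyRange_one_nat (m : Nat) :
    PySem.List.pyRange 1 (m : Int) 1 = (List.range (m - 1)).map (fun k => ((k : Int) + 1)) := by
  unfold PySem.List.pyRange
  rw [if_neg (by norm_num)]
  by_cases h : 1 < (m : Int)
  · rw [if_pos (by norm_num), if_pos h]
    have : ((m : Int) - 1 + 1 - 1) / 1 = (m : Int) - 1 := by ring_nf; simp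
    rw [this]
    have h2 : ((m : Int) - 1).toNat = m - 1 := by omega
    rw [h2]
    simp only [bind_pure_comp, List.map_eq_map, List.map_map, one_mul]
    apply List.map_congr_left
    intro k _
    simp only [Function.comp_apply]
    omega
  · rw [if_pos (by norm_num), if_neg h]
    have : m - 1 = 0 := by omega
    simp [this]

theorem foldB (cs : List Char) (acc : List Char) (s : PySem.Set String) :
    (cs.foldl (fun (st : List Char × PySem.Set String) ch =>
        let a := st.1 ++ [ch]
        (a, if ch == '/' then PySem.Set.add st.2 (String.ofList a) else st.2)) (acc, s)).2
    = ((padd cs).map (fun p => String.ofList (acc ++ p))).foldl PySem.Set.add s := by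
  induction cs generalizing acc s with
  | nil => simp [padd]
  | cons c rest ih =>
    by_cases hc : c = '/'
    · subst hc
      have h2 : padd ('/' :: rest) = ['/'] :: (padd rest).map (fun p => '/' :: p) := by
        simp [padd]
      simp only [List.foldl_cons, beq_self_eq_true, if_pos]
      rw [ih (acc ++ ['/']), h2]
      simp only [List.map_cons, List.foldl_cons, List.map_map]
      congr 1
      apply List.map_congr_left
      intro p _
      simp [Function.comp, List.append_assoc]
    · have h2 : padd (c :: rest) = (padd rest).map (fun p => c :: p) := by simp [padd, hc]
      simp only [List.foldl_cons]
      rw [if_neg (by simpa using hc)]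
      rw [ih (acc ++ [c]), h2, List.map_map]
      congr 1
      apply List.map_congr_left
      intro p _
      simp [Function.comp, List.append_assoc]

theorem mem_singleton_infix {a : Char} {l : List Char} (h : a ∈ l) : [a] <:+: l := by
  obtain ⟨s, t, rfl⟩ := List.append_of_mem h
  exact ⟨s, t, by simp⟩

theorem inner_step_eq (s : PySem.Set String) (f : List (String × String)) :
    (let rp : List Char := ((PySem.Dict.getD (PySem.Dict.mk f) "relative_path" "").toList).dropWhile (fun c => c == '/')
     if rp.isEmpty || !(PySem.Chars.isIn ['/'] rp) then s
     else
       let parts := PySem.Chars.splitOn rp ['/']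
       (PySem.List.pyRange 1 (parts.length : Int) 1).foldl
         (fun pre i =>
           PySem.Set.add pre (String.ofList (PySem.Chars.join ['/'] (PySem.List.slice parts none (some i)) ++ ['/'])))
         s)
    = (let rp : List Char := ((PySem.Dict.getD (PySem.Dict.mk f) "relative_path" "").toList).dropWhile (fun c => c == '/')
       (rp.foldl (fun (st : List Char × PySem.Set String) ch =>
           let acc := st.1 ++ [ch]
           (acc, if ch == '/' then PySem.Set.add st.2 (String.ofList acc) else st.2))
         (([] : List Char), s)).2) := by
  set rp : List Char := ((PySem.Dict.getD (PySem.Dict.mk f) "relative_path" "").toList).dropWhile (fun c => c == '/') with hrp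
  rw [foldB]
  by_cases hmem : '/' ∈ rp
  · have hne : rp ≠ [] := by rintro h; rw [h] at hmem; simp at hmem
    have hin : PySem.Chars.isIn ['/'] rp = true :=
      (PySem.Chars.isIn_iff_infix _ _).mpr (mem_singleton_infix hmem)
    rw [if_neg (by simp [hin, hne])]
    -- rewrite A's inner fold as a fold of Set.add over the mapped list
    have hfold : ∀ (l : List Int),
        l.foldl (fun pre i =>
          PySem.Set.add pre (String.ofList (PySem.Chars.join ['/']
            (PySem.List.slice (PySem.Chars.splitOn rp ['/']) none (some i)) ++ ['/']))) s
        = (l.map (fun i => String.ofList (PySem.Chars.join ['/']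
            (PySem.List.slice (PySem.Chars.splitOn rp ['/']) none (some i)) ++ ['/']))).foldl
            PySem.Set.add s := by
      intro l; rw [List.foldl_map]
    rw [hfold]
    congr 1
    rw [pyRange_one_nat]
    simp only [bind_pure_comp, List.map_eq_map, List.map_map]
    have hstep : ∀ j ∈ List.range ((PySem.Chars.splitOn rp ['/']).length - 1),
        String.ofList (PySem.Chars.join ['/']
            (PySem.List.slice (PySem.Chars.splitOn rp ['/']) none (some ((j : Int) + 1))) ++ ['/'])
        = String.ofList (PySem.Chars.join ['/'] ((PySem.Chars.splitOn rp ['/']).take (j + 1)) ++ ['/']) := by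
      intro j _
      have h0 : (0 : Int) ≤ (j : Int) + 1 := by omega
      rw [PySem.List.slice_to _ h0]
      have ht : ((j : Int) + 1).toNat = j + 1 := by omega
      rw [ht]
    calc (List.range ((PySem.Chars.splitOn rp ['/']).length - 1)).map
          ((fun i => String.ofList (PySem.Chars.join ['/']
              (PySem.List.slice (PySem.Chars.splitOn rp ['/']) none (some i)) ++ ['/'])) ∘
            (fun k => k + 1) ∘ Nat.cast)
        = (List.range ((PySem.Chars.splitOn rp ['/']).length - 1)).map
            (fun j => String.ofList (PySem.Chars.join ['/']
              ((PySem.Chars.splitOn rp ['/']).take (j + 1)) ++ ['/'])) := by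
          apply List.map_congr_left
          intro j hj
          exact hstep j hj
      _ = ((List.range ((PySem.Chars.splitOn rp ['/']).length - 1)).map
            (fun j => PySem.Chars.join ['/']
              ((PySem.Chars.splitOn rp ['/']).take (j + 1)) ++ ['/'])).map String.ofList := by
          rw [List.map_map]
          rfl
      _ = (joins (PySem.Chars.splitOn rp ['/'])).map String.ofList := by
          rw [range_map_eq_joins]
      _ = List.map (fun p => String.ofList ([] ++ p)) (padd rp) := by
          rw [splitOn_eq_splitRec, joins_splitRec, List.map_map]
          simp
  · have hpadd : padd rp = [] := padd_nil_of_not_mem hmem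
    rw [hpadd]
    have hin : PySem.Chars.isIn ['/'] rp = false := by
      rw [PySem.Chars.isIn_eq_false_iff _ _]
      intro hinf
      exact hmem (hinf.mem (by simp))
    rw [if_pos (by simp [hin])]
    simp

-- ===== VERDICT (by name: the statement is the Claim_ definition above) =====
theorem compute_subpath_options_py_spec : Claim_equal_compute_subpath_options_py := by
  intro files _
  unfold Spec_compute_subpath_options_py compute_subpath_options_py compute_subpath_options_py_alt
  exact congrArg (fun l => PySem.List.sorted l (fun x => x) false)
    (congrArg (fun g => List.foldl g PySem.Set.empty files)
      (funext fun s => funext fun f => inner_step_eq s f))
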